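-- pv_equiv track=rewrite | github.com/Uellei/materias-faculdade | Paradigmas de Programacao/Unidade9/busca_binaria.py | pesquisa_binaria_multipla
-- ===== SOURCE A (Python) =====
-- def pesquisa_binaria_multipla(lista, item):
--     posicoes = []
--     esquerda, direita = 0, len(lista) - 1
--     while esquerda <= direita:
--         meio = (esquerda + direita) // 2
--         if lista[meio] == item:
--             posicoes.append(meio)
--             esquerda_temp = meio - 1
--             while esquerda_temp >= 0 and lista[esquerda_temp] == item:
--                 posicoes.append(esquerda_temp)
--                 esquerda_temp -= 1
--             direita_temp = meio + 1
--             while direita_temp < len(lista) and lista[direita_temp] == item: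
--                 posicoes.append(direita_temp)
--                 direita_temp += 1
--             return posicoes
--         elif lista[meio] > item:
--             direita = meio - 1
--         else:  # lista[meio] < item
--             esquerda = meio + 1
--     return []
-- ===== SOURCE B (Python) =====
-- def _busca(lista, item, esquerda, direita):
--     if esquerda > direita:
--         return -1
--     meio = (esquerda + direita) // 2
--     if lista[meio] == item:
--         return meio
--     if lista[meio] > item:
--         return _busca(lista, item, esquerda, meio - 1)
--     return _busca(lista, item, meio + 1, direita)
--
-- def _desce(lista, item, i):
--     if i < 0 or lista[i] != item:
--         return []
--     return [i] + _desce(lista, item, i - 1)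
--
-- def _sobe(lista, item, i):
--     if i >= len(lista) or lista[i] != item:
--         return []
--     return [i] + _sobe(lista, item, i + 1)
--
-- def pesquisa_binaria_multipla(lista, item):
--     meio = _busca(lista, item, 0, len(lista) - 1)
--     if meio == -1:
--         return []
--     return [meio] + _desce(lista, item, meio - 1) + _sobe(lista, item, meio + 1)
-- ===== Notes on version B (the rewrite author's own statement) =====
-- stated objective: alternative
-- what changed: Replaces A's single iterative loop with mutable state and in-place appends by a fully recursive decomposition: a recursive binary-search helper returning the landing index, plus two recursive run-expansion helpers whose results are concatenated.
import Mathlib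
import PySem

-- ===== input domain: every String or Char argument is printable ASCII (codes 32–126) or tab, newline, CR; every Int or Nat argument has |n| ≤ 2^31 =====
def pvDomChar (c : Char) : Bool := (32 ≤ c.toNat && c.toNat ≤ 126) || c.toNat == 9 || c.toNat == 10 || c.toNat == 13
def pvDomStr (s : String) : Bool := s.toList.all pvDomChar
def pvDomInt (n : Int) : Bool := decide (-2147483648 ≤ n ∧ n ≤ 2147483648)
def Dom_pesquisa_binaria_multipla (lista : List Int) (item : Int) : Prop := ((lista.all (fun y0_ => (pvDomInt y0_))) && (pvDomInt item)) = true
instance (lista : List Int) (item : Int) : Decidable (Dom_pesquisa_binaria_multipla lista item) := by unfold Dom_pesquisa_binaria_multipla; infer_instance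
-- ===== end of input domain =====

-- B replaces A's iterative loop with mutable state by a fully recursive decomposition
-- (recursive search helper + two recursive run-expansion helpers); same cost, alternative structure.

-- ===== PORT A =====
-- inner while: esquerda_temp walk downward, appending to posicoes
def pvLoopLeftA (lista : List Int) (item : Int) (i : Int) (acc : List Int) : List Int :=
  if 0 ≤ i then
    match PySem.List.pyGet? lista i with
    | some v => if v = item then pvLoopLeftA lista item (i - 1) (acc ++ [i]) else acc
    | none => acc   -- unreachable on A's calls (0 ≤ i < len there)
  else acc
  termination_by (i + 1).toNat
  decreasing_by omega

-- inner while: direita_temp walk upward, appending to posicoes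
def pvLoopRightA (lista : List Int) (item : Int) (i : Int) (acc : List Int) : List Int :=
  if i < (lista.length : Int) then
    match PySem.List.pyGet? lista i with
    | some v => if v = item then pvLoopRightA lista item (i + 1) (acc ++ [i]) else acc
    | none => acc   -- unreachable on A's calls (0 ≤ i < len there)
  else acc
  termination_by ((lista.length : Int) - i).toNat
  decreasing_by omega

-- main while loop (posicoes is [] until the found branch, where it becomes [meio] and grows)
def pvLoopMainA (lista : List Int) (item : Int) (esquerda direita : Int) : List Int :=
  if _h : esquerda ≤ direita then
    let meio := PySem.Int.floordiv (esquerda + direita) 2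
    match PySem.List.pyGet? lista meio with
    | some v =>
      if v = item then
        pvLoopRightA lista item (meio + 1) (pvLoopLeftA lista item (meio - 1) [meio])
      else if v > item then
        pvLoopMainA lista item esquerda (meio - 1)
      else
        pvLoopMainA lista item (meio + 1) direita
    | none => []   -- unreachable from the top-level call (0 ≤ meio < len there)
  else []
  termination_by (direita + 1 - esquerda).toNat
  decreasing_by
    all_goals
      have := PySem.Int.floordiv_two_mid_bounds (lo := esquerda) (hi := direita) _h
      omega

def pesquisa_binaria_multipla (lista : List Int) (item : Int) : List Int :=
  pvLoopMainA lista item 0 ((lista.length : Int) - 1)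

-- ===== PORT B =====
def pvBuscaB (lista : List Int) (item : Int) (esquerda direita : Int) : Int :=
  if _h : esquerda > direita then -1
  else
    let meio := PySem.Int.floordiv (esquerda + direita) 2
    match PySem.List.pyGet? lista meio with
    | some v =>
      if v = item then meio
      else if v > item then pvBuscaB lista item esquerda (meio - 1)
      else pvBuscaB lista item (meio + 1) direita
    | none => -1   -- unreachable from the top-level call (0 ≤ meio < len there)
  termination_by (direita + 1 - esquerda).toNat
  decreasing_by
    all_goals
      have := PySem.Int.floordiv_two_mid_bounds (lo := esquerda) (hi := direita) (by omega)
      omega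

def pvDesceB (lista : List Int) (item : Int) (i : Int) : List Int :=
  if i < 0 then []
  else
    match PySem.List.pyGet? lista i with
    | some v => if v ≠ item then [] else i :: pvDesceB lista item (i - 1)
    | none => []   -- unreachable on B's calls (i < len there)
  termination_by (i + 1).toNat
  decreasing_by omega

def pvSobeB (lista : List Int) (item : Int) (i : Int) : List Int :=
  if i ≥ (lista.length : Int) then []
  else
    match PySem.List.pyGet? lista i with
    | some v => if v ≠ item then [] else i :: pvSobeB lista item (i + 1)
    | none => []   -- unreachable on B's calls (0 ≤ i there)
  termination_by ((lista.length : Int) - i).toNat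
  decreasing_by omega

def pesquisa_binaria_multipla_alt (lista : List Int) (item : Int) : List Int :=
  let meio := pvBuscaB lista item 0 ((lista.length : Int) - 1)
  if meio = -1 then []
  else meio :: (pvDesceB lista item (meio - 1) ++ pvSobeB lista item (meio + 1))

-- ===== PRECONDITION & SPEC =====
def Spec_pesquisa_binaria_multipla (lista : List Int) (item : Int) (out : List Int) : Prop := out = pesquisa_binaria_multipla_alt lista item
instance (lista : List Int) (item : Int) (out : List Int) : Decidable (Spec_pesquisa_binaria_multipla lista item out) := by unfold Spec_pesquisa_binaria_multipla; infer_instance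

-- ===== CLAIM (what is proved, stated in full; the proofs are below) =====
def Claim_equal_pesquisa_binaria_multipla : Prop := ∀ (lista : List Int) (item : Int), Dom_pesquisa_binaria_multipla lista item → Spec_pesquisa_binaria_multipla lista item (pesquisa_binaria_multipla lista item)

-- ===== LEMMAS AND PROOFS =====

-- A's downward expansion with accumulator equals B's recursive expansion, appended.
theorem pvLoopLeftA_eq (lista : List Int) (item : Int) (i : Int) (acc : List Int) :
    pvLoopLeftA lista item i acc = acc ++ pvDesceB lista item i := by
  fun_induction pvLoopLeftA lista item i acc with
  | case1 i acc hi hv ih =>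
    rw [ih]
    conv_rhs => rw [pvDesceB]
    simp [hv, Int.not_lt.mpr hi]
  | case2 i acc hi v hv hne =>
    conv_rhs => rw [pvDesceB]
    simp [hv, hne, Int.not_lt.mpr hi]
  | case3 i acc hi hv =>
    conv_rhs => rw [pvDesceB]
    simp [hv, Int.not_lt.mpr hi]
  | case4 i acc hi =>
    conv_rhs => rw [pvDesceB]
    simp [Int.not_le.mp hi]

-- A's upward expansion with accumulator equals B's recursive expansion, appended.
theorem pvLoopRightA_eq (lista : List Int) (item : Int) (i : Int) (acc : List Int) :
    pvLoopRightA lista item i acc = acc ++ pvSobeB lista item i := by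
  fun_induction pvLoopRightA lista item i acc with
  | case1 i acc hi hv ih =>
    rw [ih]
    conv_rhs => rw [pvSobeB]
    simp [hv, Int.not_le.mpr hi]
  | case2 i acc hi v hv hne =>
    conv_rhs => rw [pvSobeB]
    simp [hv, hne, Int.not_le.mpr hi]
  | case3 i acc hi hv =>
    conv_rhs => rw [pvSobeB]
    simp [hv, Int.not_le.mpr hi]
  | case4 i acc hi =>
    conv_rhs => rw [pvSobeB]
    simp [Int.not_lt.mp hi]

-- A's main loop equals "run B's recursive search, then expand" whenever 0 ≤ esquerda
-- (an invariant of every call A's top level generates; it rules out meio = -1 on success).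
theorem pvLoopMainA_eq (lista : List Int) (item : Int) (esquerda direita : Int) :
    0 ≤ esquerda →
    pvLoopMainA lista item esquerda direita =
      (if pvBuscaB lista item esquerda direita = -1 then []
       else pvBuscaB lista item esquerda direita ::
            (pvDesceB lista item (pvBuscaB lista item esquerda direita - 1) ++
             pvSobeB lista item (pvBuscaB lista item esquerda direita + 1))) := by
  fun_induction pvLoopMainA lista item esquerda direita with
  | case1 e d h meio hv =>
    intro he
    have hm := PySem.Int.floordiv_two_mid_bounds (lo := e) (hi := d) h
    have hv2 : PySem.List.pyGet? lista (PySem.Int.floordiv (e + d) 2) = some item := hv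
    have hb : pvBuscaB lista item e d = PySem.Int.floordiv (e + d) 2 := by
      rw [pvBuscaB, dif_neg (show ¬ e > d by omega)]
      simp only [hv2, if_true]
    rw [hb, if_neg (show ¬ PySem.Int.floordiv (e + d) 2 = -1 by omega)]
    rw [pvLoopRightA_eq, pvLoopLeftA_eq]
    simp [meio]
  | case2 e d h meio v hv hne hgt ih =>
    intro he
    have hv2 : PySem.List.pyGet? lista (PySem.Int.floordiv (e + d) 2) = some v := hv
    have hb : pvBuscaB lista item e d = pvBuscaB lista item e (PySem.Int.floordiv (e + d) 2 - 1) := by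
      conv_lhs => rw [pvBuscaB]
      rw [dif_neg (show ¬ e > d by omega)]
      simp only [hv2, if_neg hne, if_pos hgt]
    rw [ih he, hb]
  | case3 e d h meio v hv hne hgt ih =>
    intro he
    have hm := PySem.Int.floordiv_two_mid_bounds (lo := e) (hi := d) h
    have hv2 : PySem.List.pyGet? lista (PySem.Int.floordiv (e + d) 2) = some v := hv
    have hb : pvBuscaB lista item e d = pvBuscaB lista item (PySem.Int.floordiv (e + d) 2 + 1) d := by
      conv_lhs => rw [pvBuscaB]
      rw [dif_neg (show ¬ e > d by omega)]
      simp only [hv2, if_neg hne, if_neg hgt]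
    rw [ih (by omega), hb]
  | case4 e d h meio hv =>
    intro he
    have hv2 : PySem.List.pyGet? lista (PySem.Int.floordiv (e + d) 2) = none := hv
    have hb : pvBuscaB lista item e d = -1 := by
      rw [pvBuscaB, dif_neg (show ¬ e > d by omega)]
      simp only [hv2]
    rw [hb, if_pos rfl]
  | case5 e d h =>
    intro he
    have hb : pvBuscaB lista item e d = -1 := by
      rw [pvBuscaB, dif_pos (show e > d by omega)]
    rw [hb, if_pos rfl]

-- ===== VERDICT (by name: the statement is the Claim_ definition above) =====
theorem pesquisa_binaria_multipla_spec : Claim_equal_pesquisa_binaria_multipla := by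
  intro lista item _
  show _ = _
  unfold pesquisa_binaria_multipla pesquisa_binaria_multipla_alt
  exact pvLoopMainA_eq lista item 0 _ le_rfl
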